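-- pv_equiv track=rewrite | github.com/halfline/git-stage-batch | src/git_stage_batch/batch/merge.py | _count_lines_in_range
-- ===== SOURCE A (Python) =====
-- def _count_lines_in_range(line_set: set[int], start_line: int, end_line: int) -> int:
--     line_count = end_line - start_line + 1
--     if line_count <= len(line_set):
--         return sum(
--             1
--             for line_number in range(start_line, end_line + 1)
--             if line_number in line_set
--         )
--
--     return sum(
--         1
--         for line_number in line_set
--         if start_line <= line_number <= end_line
--     )
-- ===== SOURCE B (Python) =====
-- def _count_lines_in_range(line_set: set[int], start_line: int, end_line: int) -> int:
--     return sum(start_line <= line_number <= end_line for line_number in line_set)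
-- ===== Notes on version B (the rewrite author's own statement) =====
-- stated objective: simpler
-- what changed: A adaptively picks between iterating the range (testing set membership) and iterating the set (testing bounds) based on which is smaller; B drops the size comparison and both comprehensions and does one unconditional branch-free pass over the set, summing booleans.
import Mathlib
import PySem

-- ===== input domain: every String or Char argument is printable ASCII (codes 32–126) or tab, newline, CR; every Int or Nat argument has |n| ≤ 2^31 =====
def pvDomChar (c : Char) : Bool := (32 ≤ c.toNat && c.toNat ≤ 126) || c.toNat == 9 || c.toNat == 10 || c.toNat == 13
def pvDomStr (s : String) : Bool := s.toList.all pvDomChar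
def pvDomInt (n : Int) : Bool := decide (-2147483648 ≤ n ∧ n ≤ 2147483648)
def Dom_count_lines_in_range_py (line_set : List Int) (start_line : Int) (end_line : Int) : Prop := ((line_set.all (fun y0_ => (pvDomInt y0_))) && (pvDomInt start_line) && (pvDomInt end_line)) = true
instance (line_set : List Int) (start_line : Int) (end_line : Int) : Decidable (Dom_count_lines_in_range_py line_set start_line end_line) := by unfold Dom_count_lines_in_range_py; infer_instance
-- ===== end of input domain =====

-- B replaces A's adaptive choice between two comprehensions by one unconditional
-- branch-free pass over the set summing booleans (objective: simpler; not faster).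

-- ===== PORT A =====
def count_lines_in_range_py (line_set : List Int) (start_line : Int) (end_line : Int) : Int :=
  let line_count := end_line - start_line + 1
  if line_count ≤ (line_set.length : Int) then
    (PySem.List.pyRange start_line (end_line + 1) 1).foldl
      (fun acc line_number => if line_number ∈ line_set then acc + 1 else acc) 0
  else
    line_set.foldl
      (fun acc line_number => if start_line ≤ line_number ∧ line_number ≤ end_line then acc + 1 else acc) 0

-- ===== PORT B =====
def count_lines_in_range_py_alt (line_set : List Int) (start_line : Int) (end_line : Int) : Int :=
  line_set.foldl
    (fun acc line_number => acc + (if start_line ≤ line_number ∧ line_number ≤ end_line then 1 else 0)) 0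

-- ===== PRECONDITION & SPEC =====
-- line_set is a Python set, encoded as its list of DISTINCT elements; Pre_ only states that
-- encoding (a list with duplicates encodes no set input, so no actual input of A is excluded).
def Pre_count_lines_in_range_py (line_set : List Int) (start_line : Int) (end_line : Int) : Prop :=
  line_set.Nodup
instance (line_set : List Int) (start_line : Int) (end_line : Int) : Decidable (Pre_count_lines_in_range_py line_set start_line end_line) := by unfold Pre_count_lines_in_range_py; infer_instance
def pvWitness_count_lines_in_range_py : List Int × Int × Int := ([3, 5, 9], 2, 6)

def Spec_count_lines_in_range_py (line_set : List Int) (start_line : Int) (end_line : Int) (out : Int) : Prop := out = count_lines_in_range_py_alt line_set start_line end_line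
instance (line_set : List Int) (start_line : Int) (end_line : Int) (out : Int) : Decidable (Spec_count_lines_in_range_py line_set start_line end_line out) := by unfold Spec_count_lines_in_range_py; infer_instance

-- ===== CLAIM (what is proved, stated in full; the proofs are below) =====
def Claim_equal_count_lines_in_range_py : Prop := ∀ (line_set : List Int) (start_line : Int) (end_line : Int), Dom_count_lines_in_range_py line_set start_line end_line → Pre_count_lines_in_range_py line_set start_line end_line → Spec_count_lines_in_range_py line_set start_line end_line (count_lines_in_range_py line_set start_line end_line)

-- ===== LEMMAS AND PROOFS =====

-- splitting a countP over a disjunction of pointwise-disjoint tests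
theorem pv_countP_or_disj {α : Type} (p q : α → Bool)
    (h : ∀ x, p x = true → q x = false) :
    ∀ r : List α, r.countP (fun x => p x || q x) = r.countP p + r.countP q := by
  intro r
  induction r with
  | nil => simp
  | cons a t ih =>
    simp only [List.countP_cons, ih]
    by_cases hp : p a = true
    · have hq := h a hp
      simp [hp, hq]; omega
    · simp at hp
      by_cases hq : q a = true <;> simp [hp, hq] <;> omega

-- double counting: for duplicate-free lists, counting range members in the set
-- equals counting set members in the range
theorem pv_count_swap (s e : Int) :
    ∀ (l : List Int), l.Nodup →
      (PySem.List.pyRange s (e + 1) 1).countP (fun x => decide (x ∈ l))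
        = l.countP (fun n => decide (s ≤ n ∧ n ≤ e)) := by
  intro l
  induction l with
  | nil => simp
  | cons a t ih =>
    intro hnd
    have hat : a ∉ t := (List.nodup_cons.mp hnd).1
    have hnt : t.Nodup := (List.nodup_cons.mp hnd).2
    have hsplit : (PySem.List.pyRange s (e + 1) 1).countP (fun x => decide (x ∈ a :: t))
        = (PySem.List.pyRange s (e + 1) 1).countP (fun x => decide (x = a))
          + (PySem.List.pyRange s (e + 1) 1).countP (fun x => decide (x ∈ t)) := by
      have := pv_countP_or_disj (fun x => decide (x = a)) (fun x => decide (x ∈ t))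
        (by intro x hx; simp at hx; simp [hx]; exact hat) (PySem.List.pyRange s (e + 1) 1)
      rw [← this]
      apply List.countP_congr
      intro x _
      simp [List.mem_cons]
    have hcount : (PySem.List.pyRange s (e + 1) 1).countP (fun x => decide (x = a))
        = if s ≤ a ∧ a ≤ e then 1 else 0 := by
      have heq : (PySem.List.pyRange s (e + 1) 1).countP (fun x => decide (x = a))
          = (PySem.List.pyRange s (e + 1) 1).count a := by
        simp [List.count_eq_countP]
        apply List.countP_congr
        intro x _
        simp
      rw [heq]
      by_cases hm : a ∈ PySem.List.pyRange s (e + 1) 1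
      · rw [List.count_eq_one_of_mem (PySem.List.nodup_pyRange_one s (e+1)) hm]
        have := (PySem.List.mem_pyRange_one (x := a) (a := s) (b := e + 1)).mp hm
        simp [show s ≤ a ∧ a ≤ e by omega]
      · rw [List.count_eq_zero_of_not_mem hm]
        have : ¬ (s ≤ a ∧ a < e + 1) := fun hc => hm (PySem.List.mem_pyRange_one.mpr hc)
        simp [show ¬ (s ≤ a ∧ a ≤ e) by omega]
    rw [hsplit, hcount, ih hnt, List.countP_cons]
    by_cases h : s ≤ a ∧ a ≤ e <;> simp [h] <;> omega

-- B's fold accumulates by adding a 0/1 term; rewrite it to the if-increment shape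
theorem pv_foldB (s e : Int) :
    ∀ (l : List Int) (a : Int),
      l.foldl (fun acc n => acc + (if s ≤ n ∧ n ≤ e then 1 else 0)) a
        = a + (l.countP (fun n => decide (s ≤ n ∧ n ≤ e)) : Int) := by
  intro l
  induction l with
  | nil => simp
  | cons x t ih =>
    intro a
    simp only [List.foldl_cons, ih, List.countP_cons]
    by_cases h : s ≤ x ∧ x ≤ e <;> simp [h] <;> push_cast <;> ring

-- ===== VERDICT (by name: the statement is the Claim_ definition above) =====
theorem count_lines_in_range_py_spec : Claim_equal_count_lines_in_range_py := by
  intro line_set start_line end_line _ hpre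
  unfold Spec_count_lines_in_range_py count_lines_in_range_py count_lines_in_range_py_alt
  simp only []
  rw [pv_foldB]
  split
  · rw [PySem.List.foldl_ite_add_one (fun x => x ∈ line_set)]
    rw [pv_count_swap start_line end_line line_set hpre]
  · rw [PySem.List.foldl_ite_add_one (fun n => start_line ≤ n ∧ n ≤ end_line)]
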